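-- pv_equiv track=rewrite | github.com/HengXin666/HXLoLi-Music | py/ass/split_ass.py | clean_project_garbage
-- ===== SOURCE A (Python) =====
-- def clean_project_garbage(header: list[str]) -> list[str]:
--     """移除 [Aegisub Project Garbage] 节（含内容），避免路径残留"""
--     result = []
--     in_garbage = False
--     for line in header:
--         low = line.strip().lower()
--         if low == "[aegisub project garbage]":
--             in_garbage = True
--             continue
--         if in_garbage and low.startswith("["):
--             in_garbage = False
--         if not in_garbage:
--             result.append(line)
--     return result
-- ===== SOURCE B (Python) =====
-- def clean_project_garbage(header: list[str]) -> list[str]: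
--     """移除 [Aegisub Project Garbage] 节（含内容），避免路径残留"""
--     # Partition into sections (a leading section plus one per '['-header line),
--     # then drop every section headed by the garbage header and flatten.
--     sections = []
--     cur = []
--     for line in header:
--         if line.strip().lower().startswith("["):
--             sections.append(cur)
--             cur = [line]
--         else:
--             cur.append(line)
--     sections.append(cur)
--     return [ln for sec in sections
--             if not (sec and sec[0].strip().lower() == "[aegisub project garbage]")
--             for ln in sec]
-- ===== Notes on version B (the rewrite author's own statement) =====
-- stated objective: alternative
-- what changed: Replaces the in_garbage flag state machine with a two-phase pass: partition the header into sections at every '['-header line, then filter out sections headed by '[aegisub project garbage]' and flatten.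
import Mathlib
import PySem

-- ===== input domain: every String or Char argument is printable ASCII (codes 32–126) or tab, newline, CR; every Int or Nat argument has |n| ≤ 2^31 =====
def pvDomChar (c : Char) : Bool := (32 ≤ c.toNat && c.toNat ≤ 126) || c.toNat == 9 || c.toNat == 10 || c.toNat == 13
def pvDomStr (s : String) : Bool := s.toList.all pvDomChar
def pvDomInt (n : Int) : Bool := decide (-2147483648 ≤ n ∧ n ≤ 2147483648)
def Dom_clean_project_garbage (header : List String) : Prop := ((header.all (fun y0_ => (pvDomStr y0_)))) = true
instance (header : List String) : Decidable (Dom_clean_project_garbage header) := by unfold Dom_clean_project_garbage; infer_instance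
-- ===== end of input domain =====

-- B replaces A's in_garbage flag state machine by partitioning the header into sections
-- at every '['-header line, then filtering out garbage-headed sections and flattening (alternative decomposition, same cost).

-- ===== PORT A =====
def cpgStepA (st : List String × Bool) (line : String) : List String × Bool :=
  let low := PySem.Str.lower (PySem.Str.strip line)
  if low == "[aegisub project garbage]" then (st.1, true)
  else
    let ing := if st.2 && PySem.Str.startswith low "[" then false else st.2
    if !ing then (st.1 ++ [line], ing) else (st.1, ing)

def clean_project_garbage (header : List String) : List String :=
  (header.foldl cpgStepA ([], false)).1

-- ===== PORT B =====
def cpgSecGarbage (sec : List String) : Bool :=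
  match sec with
  | [] => false
  | l :: _ => PySem.Str.lower (PySem.Str.strip l) == "[aegisub project garbage]"

def cpgStepB (st : List (List String) × List String) (line : String) :
    List (List String) × List String :=
  if PySem.Str.startswith (PySem.Str.lower (PySem.Str.strip line)) "[" then
    (st.1 ++ [st.2], [line])
  else
    (st.1, st.2 ++ [line])

def clean_project_garbage_alt (header : List String) : List String :=
  let st := header.foldl cpgStepB ([], [])
  ((st.1 ++ [st.2]).filter (fun sec => !cpgSecGarbage sec)).flatten

-- ===== PRECONDITION & SPEC =====
def Spec_clean_project_garbage (header : List String) (out : List String) : Prop := out = clean_project_garbage_alt header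
instance (header : List String) (out : List String) : Decidable (Spec_clean_project_garbage header out) := by unfold Spec_clean_project_garbage; infer_instance

-- ===== CLAIM (what is proved, stated in full; the proofs are below) =====
def Claim_equal_clean_project_garbage : Prop := ∀ (header : List String), Dom_clean_project_garbage header → Spec_clean_project_garbage header (clean_project_garbage header)

-- ===== LEMMAS AND PROOFS =====

-- common reference function: A's remaining output from flag `ing`
def cpgGo : List String → Bool → List String
  | [], _ => []
  | l :: ls, ing =>
    let lw := PySem.Str.lower (PySem.Str.strip l)
    if lw == "[aegisub project garbage]" then cpgGo ls true
    else
      let ing' := if ing && PySem.Str.startswith lw "[" then false else ing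
      if !ing' then l :: cpgGo ls ing' else cpgGo ls ing'

theorem cpg_foldA (ls : List String) : ∀ (res : List String) (ing : Bool),
    (ls.foldl cpgStepA (res, ing)).1 = res ++ cpgGo ls ing := by
  induction ls with
  | nil => intro res ing; simp [cpgGo]
  | cons l ls ih =>
    intro res ing
    simp only [List.foldl_cons, cpgStepA, cpgGo]
    by_cases h1 : (PySem.Str.lower (PySem.Str.strip l) == "[aegisub project garbage]") = true
    · simp [h1, ih]
    · cases hb : PySem.Chars.startswith (PySem.Chars.lower (PySem.Chars.strip l.toList)) ['['] <;>
        cases ing <;> simp [h1, hb, ih]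

theorem cpg_not_bracket_ne (l : String)
    (h : PySem.Chars.startswith (PySem.Chars.lower (PySem.Chars.strip l.toList)) ['['] = false) :
    (PySem.Str.lower (PySem.Str.strip l) == "[aegisub project garbage]") = false := by
  by_contra hne
  simp only [Bool.not_eq_false, beq_iff_eq] at hne
  have ht := congrArg String.toList hne
  simp only [PySem.Str.toList_lower, PySem.Str.toList_strip] at ht
  rw [ht] at h
  revert h
  decide

theorem cpg_foldB (ls : List String) : ∀ (secs : List (List String)) (cur : List String),
    ((((ls.foldl cpgStepB (secs, cur)).1 ++ [(ls.foldl cpgStepB (secs, cur)).2]).filter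
        (fun sec => !cpgSecGarbage sec)).flatten)
    = ((secs.filter (fun sec => !cpgSecGarbage sec)).flatten)
      ++ (if cpgSecGarbage cur then [] else cur) ++ cpgGo ls (cpgSecGarbage cur) := by
  induction ls with
  | nil =>
    intro secs cur
    simp only [List.foldl_nil, List.filter_append, List.flatten_append, cpgGo, List.append_nil]
    by_cases h : cpgSecGarbage cur = true <;> simp [h]
  | cons l ls ih =>
    intro secs cur
    by_cases hs : PySem.Chars.startswith (PySem.Chars.lower (PySem.Chars.strip l.toList)) ['['] = true
    · have hstep : List.foldl cpgStepB (secs, cur) (l :: ls)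
          = List.foldl cpgStepB (secs ++ [cur], [l]) ls := by
        simp [cpgStepB, hs]
      rw [hstep, ih]
      by_cases h1 : (PySem.Str.lower (PySem.Str.strip l) == "[aegisub project garbage]") = true
      · have hg : cpgSecGarbage [l] = true := by simpa [cpgSecGarbage] using h1
        cases hc : cpgSecGarbage cur <;> simp [cpgGo, h1, hg, hc, List.filter_append]
      · have hg : cpgSecGarbage [l] = false := by simpa [cpgSecGarbage] using h1
        cases hc : cpgSecGarbage cur <;> simp [cpgGo, h1, hg, hc, hs, List.filter_append]
    · simp only [Bool.not_eq_true] at hs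
      have hne := cpg_not_bracket_ne l hs
      have hg : cpgSecGarbage (cur ++ [l]) = cpgSecGarbage cur := by
        cases cur with
        | nil => simp [cpgSecGarbage, hne]
        | cons c cs => simp [cpgSecGarbage]
      have hstep : List.foldl cpgStepB (secs, cur) (l :: ls)
          = List.foldl cpgStepB (secs, cur ++ [l]) ls := by
        simp [cpgStepB, hs]
      rw [hstep, ih, hg]
      cases hc : cpgSecGarbage cur <;> simp [cpgGo, hne, hs]

-- ===== VERDICT (by name: the statement is the Claim_ definition above) =====
theorem clean_project_garbage_spec : Claim_equal_clean_project_garbage := by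
  intro header _
  unfold Spec_clean_project_garbage clean_project_garbage clean_project_garbage_alt
  rw [cpg_foldA header [] false, cpg_foldB header [] []]
  simp [cpgSecGarbage]
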